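-- pv_equiv track=rewrite | github.com/bryceroche/mycelium | scripts/train_gts_gsm8k.py | build_output_vocab
-- ===== SOURCE A (Python) =====
-- from collections import Counter
--
-- def build_output_vocab(data: list[dict]) -> dict:
--     """Build output vocabulary from prefix expressions."""
--     # Operators first (in order)
--     operators = ["+", "-", "*", "/"]
--
--     # Count all symbols
--     symbol_counts = Counter()
--     for item in data:
--         for prefix in item["prefix_steps"]:
--             tokens = prefix.split()
--             symbol_counts.update(tokens)
--
--     # Find max NUM_X index
--     max_num = 0
--     max_const = 0
--     max_step = 0
--     for symbol in symbol_counts: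
--         if symbol.startswith("NUM_"):
--             idx = int(symbol.split("_")[1])
--             max_num = max(max_num, idx)
--         elif symbol.startswith("CONST_"):
--             idx = int(symbol.split("_")[1])
--             max_const = max(max_const, idx)
--         elif symbol.startswith("step_"):
--             idx = int(symbol.split("_")[1])
--             max_step = max(max_step, idx)
--
--     # Build output vocab
--     out_symbols = operators.copy()
--
--     # Add NUM_X tokens
--     for i in range(max_num + 1):
--         out_symbols.append(f"NUM_{i}")
--
--     # Add CONST_X tokens
--     for i in range(max_const + 1):
--         out_symbols.append(f"CONST_{i}")
--
--     # Add step_X tokens for chaining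
--     for i in range(1, max_step + 1):
--         out_symbols.append(f"step_{i}")
--
--     out_symbols.append("<UNK>")
--
--     # Temp symbols (for generated constants - placeholders)
--     temp_symbols = ["<OPT>"] + out_symbols[len(operators):]
--
--     return {
--         "out_idx2symbol": out_symbols,
--         "temp_idx2symbol": temp_symbols,
--     }
-- ===== SOURCE B (Python) =====
-- def build_output_vocab(data: list[dict]) -> dict:
--     """Build output vocabulary from prefix expressions."""
--     # Grow the three vocab sections in place while scanning; no Counter, no max_* scalars,
--     # no post-pass range() materialisation: each list IS the running answer.
--     nums, consts, steps = ["NUM_0"], ["CONST_0"], []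
--     for item in data:
--         for prefix in item["prefix_steps"]:
--             for tok in prefix.split():
--                 if tok.startswith("NUM_"):
--                     i = int(tok.split("_")[1])
--                     while len(nums) <= i:
--                         nums.append(f"NUM_{len(nums)}")
--                 elif tok.startswith("CONST_"):
--                     i = int(tok.split("_")[1])
--                     while len(consts) <= i:
--                         consts.append(f"CONST_{len(consts)}")
--                 elif tok.startswith("step_"):
--                     i = int(tok.split("_")[1])
--                     while len(steps) < i:
--                         steps.append(f"step_{len(steps) + 1}")
--     tail = nums + consts + steps + ["<UNK>"]
--     return {
--         "out_idx2symbol": ["+", "-", "*", "/"] + tail,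
--         "temp_idx2symbol": ["<OPT>"] + tail,
--     }
-- ===== Notes on version B (the rewrite author's own statement) =====
-- stated objective: alternative
-- what changed: B discards A's Counter, the three max_* scalars and the post-pass range() materialisation: it grows the three vocab lists (NUM_*, CONST_*, step_*) in place while scanning the tokens, so each list is the running answer and the final dict is assembled from them directly.
import Mathlib
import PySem

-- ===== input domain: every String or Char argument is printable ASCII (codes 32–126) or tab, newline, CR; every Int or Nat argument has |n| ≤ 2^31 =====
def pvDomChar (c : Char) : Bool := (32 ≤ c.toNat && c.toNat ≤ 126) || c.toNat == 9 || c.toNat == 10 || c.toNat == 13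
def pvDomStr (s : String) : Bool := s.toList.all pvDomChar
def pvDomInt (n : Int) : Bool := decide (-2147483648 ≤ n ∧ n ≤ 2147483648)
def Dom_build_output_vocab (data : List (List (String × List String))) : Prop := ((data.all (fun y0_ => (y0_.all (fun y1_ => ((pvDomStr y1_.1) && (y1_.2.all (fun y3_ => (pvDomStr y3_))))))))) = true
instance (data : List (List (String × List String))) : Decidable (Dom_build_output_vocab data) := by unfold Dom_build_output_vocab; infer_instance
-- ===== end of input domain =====

-- B replaces A's Counter + three max_* scalars + post-pass range() materialisation by three
-- vocab lists grown in place during the scan, so each list IS the running answer (objective: alternative).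

-- shared transliteration of `int(t.split("_")[1])` (none = ValueError/IndexError, excluded by Pre_)
def pvIdx? (t : String) : Option Int :=
  (PySem.List.pyGet? ((PySem.Str.split? t "_").getD []) 1).bind PySem.Int.ofStr?
def pvIdx (t : String) : Int := (pvIdx? t).getD 0
-- shared transliteration of `item["prefix_steps"]` (missing key = KeyError, excluded by Pre_)
def pvSteps (item : List (String × List String)) : List String :=
  (PySem.Dict.mk item).getD "prefix_steps" []

-- ===== PORT A =====
def build_output_vocab (data : List (List (String × List String))) : List (String × List String) :=
  let counts : PySem.Dict String Int :=
    data.foldl (fun d item =>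
      (pvSteps item).foldl (fun d pre =>
        (PySem.Str.split₀ pre).foldl (fun d t => d.modify t 0 (· + 1)) d) d) PySem.Dict.empty
  let m : Int × Int × Int :=
    counts.keys.foldl (fun m s =>
      if PySem.Str.startswith s "NUM_" then (max m.1 (pvIdx s), m.2.1, m.2.2)
      else if PySem.Str.startswith s "CONST_" then (m.1, max m.2.1 (pvIdx s), m.2.2)
      else if PySem.Str.startswith s "step_" then (m.1, m.2.1, max m.2.2 (pvIdx s))
      else m) (0, 0, 0)
  let outSymbols : List String :=
    ["+", "-", "*", "/"]
    ++ (PySem.List.pyRange 0 (m.1 + 1) 1).map (fun i => "NUM_" ++ PySem.Int.toStr i)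
    ++ (PySem.List.pyRange 0 (m.2.1 + 1) 1).map (fun i => "CONST_" ++ PySem.Int.toStr i)
    ++ (PySem.List.pyRange 1 (m.2.2 + 1) 1).map (fun i => "step_" ++ PySem.Int.toStr i)
    ++ ["<UNK>"]
  let tempSymbols : List String := ["<OPT>"] ++ PySem.List.slice outSymbols (some 4) none
  [("out_idx2symbol", outSymbols), ("temp_idx2symbol", tempSymbols)]

-- ===== PORT B =====
-- `while len(l) + off <= i: l.append(pfx + str(len(l) + off))`  (nums/consts: off = 0, steps: off = 1)
def growList (pfx : String) (off : Int) (l : List String) (i : Int) : List String :=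
  if _h : (l.length : Int) + off ≤ i then
    growList pfx off (l ++ [pfx ++ PySem.Int.toStr ((l.length : Int) + off)]) i
  else l
termination_by (i + 1 - off - l.length).toNat
decreasing_by simp only [List.length_append, List.length_cons, List.length_nil]; omega

def build_output_vocab_alt (data : List (List (String × List String))) : List (String × List String) :=
  let st : List String × List String × List String :=
    data.foldl (fun st item =>
      (pvSteps item).foldl (fun st pre =>
        (PySem.Str.split₀ pre).foldl (fun st tok =>
          if PySem.Str.startswith tok "NUM_" then (growList "NUM_" 0 st.1 (pvIdx tok), st.2.1, st.2.2)
          else if PySem.Str.startswith tok "CONST_" then (st.1, growList "CONST_" 0 st.2.1 (pvIdx tok), st.2.2)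
          else if PySem.Str.startswith tok "step_" then (st.1, st.2.1, growList "step_" 1 st.2.2 (pvIdx tok))
          else st) st) st) (["NUM_0"], ["CONST_0"], [])
  let tail : List String := st.1 ++ st.2.1 ++ st.2.2 ++ ["<UNK>"]
  [("out_idx2symbol", ["+", "-", "*", "/"] ++ tail), ("temp_idx2symbol", ["<OPT>"] ++ tail)]

-- ===== PRECONDITION & SPEC =====
-- Pre_ excludes exactly the inputs on which the Python A raises: an item without the
-- "prefix_steps" key (KeyError), or a token starting with "NUM_"/"CONST_"/"step_" whose
-- part after the first "_" is not a Python int literal (ValueError in int()).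
def Pre_build_output_vocab (data : List (List (String × List String))) : Prop :=
  (data.all (fun item =>
    (PySem.Dict.mk item).contains "prefix_steps" &&
    (pvSteps item).all (fun p =>
      (PySem.Str.split₀ p).all (fun t =>
        !(PySem.Str.startswith t "NUM_" || PySem.Str.startswith t "CONST_" ||
          PySem.Str.startswith t "step_") || (pvIdx? t).isSome)))) = true
instance (data : List (List (String × List String))) : Decidable (Pre_build_output_vocab data) := by
  unfold Pre_build_output_vocab; infer_instance

def pvWitness_build_output_vocab : (List (List (String × List String))) :=
  [[("prefix_steps", ["+ NUM_0 NUM_1", "step_1 CONST_0"])]]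

def Spec_build_output_vocab (data : List (List (String × List String))) (out : List (String × List String)) : Prop := out = build_output_vocab_alt data
instance (data : List (List (String × List String))) (out : List (String × List String)) : Decidable (Spec_build_output_vocab data out) := by unfold Spec_build_output_vocab; infer_instance

-- ===== CLAIM (what is proved, stated in full; the proofs are below) =====
def Claim_equal_build_output_vocab : Prop := ∀ (data : List (List (String × List String))), Dom_build_output_vocab data → Pre_build_output_vocab data → Spec_build_output_vocab data (build_output_vocab data)

-- ===== LEMMAS AND PROOFS =====

-- the flat token stream
def pvTokens (data : List (List (String × List String))) : List String :=
  data.flatMap (fun item => (pvSteps item).flatMap (fun p => PySem.Str.split₀ p))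

lemma foldl_flatMap {α β γ : Type} (l : List α) (f : α → List β) (g : γ → β → γ) (init : γ) :
    (l.flatMap f).foldl g init = l.foldl (fun acc a => (f a).foldl g acc) init := by
  induction l generalizing init with
  | nil => rfl
  | cons x xs ih => simp [List.flatMap_cons, List.foldl_append, ih]

-- any nested data/steps/tokens fold is a fold over the flat token stream
lemma nested_fold_eq {γ : Type} (data : List (List (String × List String)))
    (F : γ → String → γ) (init : γ) :
    data.foldl (fun st item =>
      (pvSteps item).foldl (fun st pre => (PySem.Str.split₀ pre).foldl F st) st) init
    = (pvTokens data).foldl F init := by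
  rw [pvTokens, foldl_flatMap]
  congr 1; funext st item; rw [foldl_flatMap]

-- prefix exclusivity: a token starts with at most one of "NUM_", "CONST_", "step_"
lemma startswith_head {s p q : String} (hp : PySem.Str.startswith s p = true)
    (hq : PySem.Str.startswith s q = true) (a b : Char) (ta tb : List Char)
    (hpl : p.toList = a :: ta) (hql : q.toList = b :: tb) : a = b := by
  have h1 : p.toList <+: s.toList := by
    simpa using (PySem.Chars.startswith_iff _ _).mp (by simpa using hp)
  have h2 : q.toList <+: s.toList := by
    simpa using (PySem.Chars.startswith_iff _ _).mp (by simpa using hq)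
  rw [hpl] at h1; rw [hql] at h2
  rcases h1 with ⟨t1, h1⟩; rcases h2 with ⟨t2, h2⟩
  rw [← h1] at h2
  simpa using (congrArg (·.head?) h2).symm

lemma num_not_const {s : String} (h : PySem.Str.startswith s "NUM_" = true) :
    PySem.Str.startswith s "CONST_" = false := by
  by_contra hc
  have hc' : PySem.Str.startswith s "CONST_" = true := by
    cases hC : PySem.Str.startswith s "CONST_" <;> simp_all
  have := startswith_head h hc' 'N' 'C' ['U','M','_'] ['O','N','S','T','_'] (by decide) (by decide)
  simp at this

lemma num_not_step {s : String} (h : PySem.Str.startswith s "NUM_" = true) :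
    PySem.Str.startswith s "step_" = false := by
  by_contra hc
  have hc' : PySem.Str.startswith s "step_" = true := by
    cases hC : PySem.Str.startswith s "step_" <;> simp_all
  have := startswith_head h hc' 'N' 's' ['U','M','_'] ['t','e','p','_'] (by decide) (by decide)
  simp at this

lemma const_not_step {s : String} (h : PySem.Str.startswith s "CONST_" = true) :
    PySem.Str.startswith s "step_" = false := by
  by_contra hc
  have hc' : PySem.Str.startswith s "step_" = true := by
    cases hC : PySem.Str.startswith s "step_" <;> simp_all
  have := startswith_head h hc' 'C' 's' ['O','N','S','T','_'] ['t','e','p','_'] (by decide) (by decide)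
  simp at this

-- one conditional max step (A side, componentwise)
def pvStep (c : String → Bool) (a : Int) (s : String) : Int := if c s then max a (pvIdx s) else a

lemma triple_head (x : String) (a b c : Int) :
    (if PySem.Str.startswith x "NUM_" = true then (max a (pvIdx x), b, c)
     else if PySem.Str.startswith x "CONST_" = true then (a, max b (pvIdx x), c)
     else if PySem.Str.startswith x "step_" = true then (a, b, max c (pvIdx x))
     else (a, b, c))
    = (pvStep (fun s => PySem.Str.startswith s "NUM_") a x,
       pvStep (fun s => PySem.Str.startswith s "CONST_") b x,
       pvStep (fun s => PySem.Str.startswith s "step_") c x) := by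
  simp only [pvStep]
  by_cases h1 : PySem.Str.startswith x "NUM_" = true
  · simp only [h1, num_not_const h1, num_not_step h1]; simp
  · rw [Bool.not_eq_true] at h1
    by_cases h2 : PySem.Str.startswith x "CONST_" = true
    · simp only [h1, h2, const_not_step h2]; simp
    · rw [Bool.not_eq_true] at h2
      by_cases h3 : PySem.Str.startswith x "step_" = true
      · simp only [h1, h2, h3]; simp
      · rw [Bool.not_eq_true] at h3
        simp only [h1, h2, h3]; simp

-- A's triple-state fold splits into three independent folds
lemma triple_split (l : List String) (a b c : Int) :
    l.foldl (fun m s =>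
      if PySem.Str.startswith s "NUM_" then (max m.1 (pvIdx s), m.2.1, m.2.2)
      else if PySem.Str.startswith s "CONST_" then (m.1, max m.2.1 (pvIdx s), m.2.2)
      else if PySem.Str.startswith s "step_" then (m.1, m.2.1, max m.2.2 (pvIdx s))
      else m) (a, b, c)
    = (l.foldl (pvStep (fun s => PySem.Str.startswith s "NUM_")) a,
       l.foldl (pvStep (fun s => PySem.Str.startswith s "CONST_")) b,
       l.foldl (pvStep (fun s => PySem.Str.startswith s "step_")) c) := by
  induction l generalizing a b c with
  | nil => rfl
  | cons x xs ih =>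
    simp only [List.foldl_cons]
    rw [triple_head]
    exact ih _ _ _

-- B's triple-list fold splits into three independent folds (same exclusivity argument)
lemma triple_split_B (l : List String) (a b c : List String) :
    l.foldl (fun st tok =>
      if PySem.Str.startswith tok "NUM_" then (growList "NUM_" 0 st.1 (pvIdx tok), st.2.1, st.2.2)
      else if PySem.Str.startswith tok "CONST_" then (st.1, growList "CONST_" 0 st.2.1 (pvIdx tok), st.2.2)
      else if PySem.Str.startswith tok "step_" then (st.1, st.2.1, growList "step_" 1 st.2.2 (pvIdx tok))
      else st) (a, b, c)
    = (l.foldl (fun x t => if PySem.Str.startswith t "NUM_" then growList "NUM_" 0 x (pvIdx t) else x) a,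
       l.foldl (fun x t => if PySem.Str.startswith t "CONST_" then growList "CONST_" 0 x (pvIdx t) else x) b,
       l.foldl (fun x t => if PySem.Str.startswith t "step_" then growList "step_" 1 x (pvIdx t) else x) c) := by
  induction l generalizing a b c with
  | nil => rfl
  | cons x xs ih =>
    simp only [List.foldl_cons]
    by_cases h1 : PySem.Str.startswith x "NUM_" = true
    · simp only [h1, num_not_const h1, num_not_step h1, if_true, Bool.false_eq_true, if_false]
      exact ih _ _ _
    · rw [Bool.not_eq_true] at h1
      by_cases h2 : PySem.Str.startswith x "CONST_" = true
      · simp only [h1, h2, const_not_step h2, if_true, Bool.false_eq_true, if_false]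
        exact ih _ _ _
      · rw [Bool.not_eq_true] at h2
        by_cases h3 : PySem.Str.startswith x "step_" = true
        · simp only [h1, h2, h3, if_true, Bool.false_eq_true, if_false]
          exact ih _ _ _
        · rw [Bool.not_eq_true] at h3
          simp only [h1, h2, h3, Bool.false_eq_true, if_false]
          exact ih _ _ _

-- a pvStep fold is the max-fold over the filtered, parsed list
lemma step_fold_eq (c : String → Bool) (l : List String) (a : Int) :
    l.foldl (pvStep c) a = ((l.filter c).map pvIdx).foldl max a := by
  induction l generalizing a with
  | nil => rfl
  | cons x xs ih =>
    by_cases h : c x <;> simp [pvStep, h, ih]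

-- a max-fold over Int depends only on the SET of elements
lemma foldl_max_set_eq {l1 l2 : List Int} (a : Int) (h : ∀ x, x ∈ l1 ↔ x ∈ l2) :
    l1.foldl max a = l2.foldl max a := by
  apply le_antisymm
  · rcases PySem.List.foldl_max_mem l1 a with he | he
    · rw [he]; exact (PySem.List.le_foldl_max l2 a).1
    · exact (PySem.List.le_foldl_max l2 a).2 _ ((h _).mp he)
  · rcases PySem.List.foldl_max_mem l2 a with he | he
    · rw [he]; exact (PySem.List.le_foldl_max l1 a).1
    · exact (PySem.List.le_foldl_max l1 a).2 _ ((h _).mpr he)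

-- maxima over the deduplicated Counter keys = maxima over the raw token stream
lemma dedup_fold (c : String → Bool) (l : List String) :
    (PySem.Set.ofList l).foldl (pvStep c) 0 = l.foldl (pvStep c) 0 := by
  rw [step_fold_eq, step_fold_eq]
  apply foldl_max_set_eq
  intro x
  simp [List.mem_map, List.mem_filter, PySem.Set.mem_ofList]

-- the canonical section list of length n
def canon (pfx : String) (off : Int) (n : Nat) : List String :=
  (List.range n).map (fun (k : Nat) => pfx ++ PySem.Int.toStr ((k : Int) + off))

lemma grow_canon (pfx : String) (off i : Int) :
    ∀ (k n : Nat), (i + 1 - off - n).toNat ≤ k →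
      growList pfx off (canon pfx off n) i = canon pfx off (max n (i + 1 - off).toNat) := by
  intro k
  induction k with
  | zero =>
    intro n hk
    rw [growList]
    have hlen : ((canon pfx off n).length : Int) = n := by simp [canon]
    have hlt : ¬ ((canon pfx off n).length : Int) + off ≤ i := by rw [hlen]; omega
    rw [dif_neg hlt]
    have : max n (i + 1 - off).toNat = n := by omega
    rw [this]
  | succ k ih =>
    intro n hk
    rw [growList]
    have hlen : ((canon pfx off n).length : Int) = n := by simp [canon]
    by_cases h : ((canon pfx off n).length : Int) + off ≤ i
    · rw [dif_pos h]
      rw [hlen] at h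
      have hext : canon pfx off n ++ [pfx ++ PySem.Int.toStr (((canon pfx off n).length : Int) + off)]
          = canon pfx off (n + 1) := by
        rw [hlen]; simp [canon, List.range_succ]
      rw [hext, ih (n + 1) (by omega)]
      congr 1; omega
    · rw [dif_neg h]
      rw [hlen] at h
      have : max n (i + 1 - off).toNat = n := by omega
      rw [this]

-- a component fold starting from a canonical list stays canonical, tracking a Nat max
lemma fold_grow_canon (pfx : String) (off : Int) (c : String → Bool) (l : List String) :
    ∀ (n : Nat),
      l.foldl (fun x t => if c t then growList pfx off x (pvIdx t) else x) (canon pfx off n)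
      = canon pfx off (l.foldl (fun m t => if c t then max m (pvIdx t + 1 - off).toNat else m) n) := by
  induction l with
  | nil => intro n; rfl
  | cons x xs ih =>
    intro n
    simp only [List.foldl_cons]
    by_cases h : c x
    · simp only [h, if_true]
      rw [grow_canon pfx off (pvIdx x) (pvIdx x + 1 - off - n).toNat n le_rfl, ih]
    · simp only [h, Bool.false_eq_true, if_false, ih]

-- the Nat max fold equals the Int max fold (pvStep), shifted
lemma fold_nat_int (c : String → Bool) (off : Int) (l : List String) :
    ∀ (a : Int),
      l.foldl (fun m t => if c t then max m (pvIdx t + 1 - off).toNat else m) ((a + 1 - off).toNat)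
      = ((l.foldl (pvStep c) a) + 1 - off).toNat := by
  induction l with
  | nil => intro a; rfl
  | cons x xs ih =>
    intro a
    simp only [List.foldl_cons, pvStep]
    by_cases h : c x
    · simp only [h, if_true]
      have : max ((a + 1 - off).toNat) ((pvIdx x + 1 - off).toNat)
          = ((max a (pvIdx x)) + 1 - off).toNat := by omega
      rw [this, ih]
    · simp only [h, Bool.false_eq_true, if_false, ih]

-- B's per-component result, end to end
lemma comp_final (pfx : String) (off : Int) (c : String → Bool) (l : List String) (a : Int) :
    l.foldl (fun x t => if c t then growList pfx off x (pvIdx t) else x) (canon pfx off ((a + 1 - off).toNat))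
    = canon pfx off ((l.foldl (pvStep c) a) + 1 - off).toNat := by
  rw [fold_grow_canon, fold_nat_int]

-- A's range-built section is the canonical list
lemma pyRange_map_canon (pfx : String) (off m : Int) :
    (PySem.List.pyRange off (m + 1) 1).map (fun i => pfx ++ PySem.Int.toStr i)
    = canon pfx off ((m + 1 - off).toNat) := by
  unfold canon
  rw [PySem.List.pyRange_one, List.map_map]
  exact List.map_congr_left (fun k _ => by simp [Int.add_comm])

-- the three component folds of B, with their literal initial lists
lemma comp_finalN (l : List String) :
    l.foldl (fun x t => if PySem.Str.startswith t "NUM_" then growList "NUM_" 0 x (pvIdx t) else x) ["NUM_0"]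
    = canon "NUM_" 0 ((l.foldl (pvStep (fun s => PySem.Str.startswith s "NUM_")) 0) + 1 - 0).toNat := by
  have h : (["NUM_0"] : List String) = canon "NUM_" 0 (((0 : Int) + 1 - 0).toNat) := by decide
  rw [h, comp_final]

lemma comp_finalC (l : List String) :
    l.foldl (fun x t => if PySem.Str.startswith t "CONST_" then growList "CONST_" 0 x (pvIdx t) else x) ["CONST_0"]
    = canon "CONST_" 0 ((l.foldl (pvStep (fun s => PySem.Str.startswith s "CONST_")) 0) + 1 - 0).toNat := by
  have h : (["CONST_0"] : List String) = canon "CONST_" 0 (((0 : Int) + 1 - 0).toNat) := by decide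
  rw [h, comp_final]

lemma comp_finalS (l : List String) :
    l.foldl (fun x t => if PySem.Str.startswith t "step_" then growList "step_" 1 x (pvIdx t) else x) []
    = canon "step_" 1 ((l.foldl (pvStep (fun s => PySem.Str.startswith s "step_")) 0) + 1 - 1).toNat := by
  have h : ([] : List String) = canon "step_" 1 (((0 : Int) + 1 - 1).toNat) := by decide
  rw [h, comp_final]

-- ===== VERDICT (by name: the statement is the Claim_ definition above) =====
theorem build_output_vocab_spec : Claim_equal_build_output_vocab := by
  intro data _ _
  show build_output_vocab data = build_output_vocab_alt data
  unfold build_output_vocab build_output_vocab_alt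
  simp only [nested_fold_eq, ← PySem.Dict.counter_eq_foldl, PySem.Dict.keys_counter,
    triple_split, triple_split_B, dedup_fold]
  rw [comp_finalN, comp_finalC, comp_finalS,
    pyRange_map_canon, pyRange_map_canon, pyRange_map_canon,
    PySem.List.slice_from _ (by norm_num : (0:Int) ≤ 4)]
  simp
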